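-- pv_equiv track=rewrite | github.com/Josesosa0777/Pytch | dataeval/src/primitives/ldws.py | join_phases
-- ===== SOURCE A (Python) =====
-- def join_phases(jumps, head, tail):
--   """
--   >>> head =  [(12, 34), (56, 58), (92, 93)]
--   >>> jumps = [[12],     [56],     [92]]
--   >>> tail =  [(34, 45), (58, 66)]
--   >>> LdwsStatus.join_phases(jumps, head, tail)
--   ([[12, 34], [56, 58], [92]], [(12, 45), (56, 66), (92, 93)])
--   """
--   join = []
--   for jump, (head_start, head_end) in zip(jumps, head):
--     for tail_part in tail:
--       tail_start, tail_end = tail_part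
--       if tail_start == head_end:
--         join.append( (head_start, tail_end) )
--         jump.append(tail_start)
--         break
--     else:
--       join.append( (head_start, head_end) )
--       continue
--     tail.remove(tail_part)
--   return jumps, join
-- ===== SOURCE B (Python) =====
-- def join_phases(jumps, head, tail):
--     # Pure two-phase rank join instead of A's destructive scan-and-remove:
--     # phase 1 numbers each tail segment by the occurrence rank of its start
--     # value and records (start, rank) -> end in one flat table; phase 2
--     # numbers each head segment by the occurrence rank of its end value, and
--     # the head carrying (end, rank) matches exactly the tail carrying the
--     # same (start, rank).  Nothing is ever removed or popped.  Equivalence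
--     # is about the RETURN value only: A mutates jumps/tail in place, B does not.
--     table = {}
--     rank = {}
--     for s, e in tail:
--         r = rank.get(s, 0)
--         rank[s] = r + 1
--         table[(s, r)] = e
--     out_jumps = []
--     join = []
--     seen = {}
--     for jump, (hs, he) in zip(jumps, head):
--         r = seen.get(he, 0)
--         seen[he] = r + 1
--         te = table.get((he, r))
--         if te is None:
--             out_jumps.append(jump)
--             join.append((hs, he))
--         else:
--             out_jumps.append(jump + [he])
--             join.append((hs, te))
--     out_jumps.extend(jumps[len(head):])
--     return out_jumps, join
-- ===== Notes on version B (the rewrite author's own statement) =====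
-- stated objective: alternative
-- what changed: Replaces A's destructive inner scan of tail (find first match, list.remove) with a pure two-phase rank join: both sides are numbered by occurrence rank of the key and a head with (end,rank) matches the tail with the same (start,rank) via one flat table, with nothing ever removed; equivalence is on the return value only (A mutates jumps and tail in place, B does not).
import Mathlib
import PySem

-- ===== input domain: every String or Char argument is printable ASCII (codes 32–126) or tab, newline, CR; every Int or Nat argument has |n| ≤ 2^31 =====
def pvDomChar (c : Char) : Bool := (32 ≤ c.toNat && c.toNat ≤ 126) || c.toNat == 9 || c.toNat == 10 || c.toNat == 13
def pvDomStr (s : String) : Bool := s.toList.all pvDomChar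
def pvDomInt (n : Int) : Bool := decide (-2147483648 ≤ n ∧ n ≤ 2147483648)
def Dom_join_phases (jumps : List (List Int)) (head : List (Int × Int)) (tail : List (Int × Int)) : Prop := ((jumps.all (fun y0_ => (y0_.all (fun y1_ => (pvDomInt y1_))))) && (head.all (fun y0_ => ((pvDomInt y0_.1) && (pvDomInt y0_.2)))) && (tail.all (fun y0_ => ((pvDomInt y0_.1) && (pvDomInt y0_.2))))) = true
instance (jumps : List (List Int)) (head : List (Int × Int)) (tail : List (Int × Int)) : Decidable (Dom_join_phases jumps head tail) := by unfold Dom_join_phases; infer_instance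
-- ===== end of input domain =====

-- ===== PORT A =====
-- B is a pure two-phase rank join (number both sides by occurrence rank of
-- the key, match equal (key, rank) pairs through one flat table) in place of
-- A's destructive scan-and-remove over tail.  Equivalence is about the
-- RETURN value only: A mutates jumps/tail in place, B does not.
-- inner 'for tail_part in tail: ... break' = first tail element whose start equals head_end;
-- tail.remove(tail_part) cannot fail (the found element is in tail), so .getD ts is unreachable
def pvLoopA : List (List Int × (Int × Int)) → List (Int × Int) → List (List Int) × List (Int × Int) × List (Int × Int)
  | [], ts => ([], ts, [])
  | (jump, (hs, he)) :: rest, ts =>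
    match ts.find? (fun p => p.1 == he) with
    | some tp =>
      let ts' := (PySem.List.remove? ts tp).getD ts
      let r := pvLoopA rest ts'
      ((jump ++ [tp.1]) :: r.1, r.2.1, (hs, tp.2) :: r.2.2)
    | none =>
      let r := pvLoopA rest ts
      (jump :: r.1, r.2.1, (hs, he) :: r.2.2)

def join_phases (jumps : List (List Int)) (head : List (Int × Int)) (tail : List (Int × Int)) : List (List Int) × (List (Int × Int)) :=
  let r := pvLoopA (jumps.zip head) tail
  (r.1 ++ jumps.drop head.length, r.2.2)

-- ===== PORT B =====
-- phase 1: 'for s, e in tail: r = rank.get(s,0); rank[s] = r+1; table[(s,r)] = e'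
def pvTable (tail : List (Int × Int)) : PySem.Dict (Int × Int) Int :=
  (tail.foldl (fun st p =>
      let r := st.2.getD p.1 0
      (st.1.insert (p.1, r) p.2, st.2.insert p.1 (r + 1)))
    ((PySem.Dict.empty : PySem.Dict (Int × Int) Int), (PySem.Dict.empty : PySem.Dict Int Int))).1

-- phase 2: 'for jump, (hs, he) in zip(jumps, head): ...' with the seen-rank dict
def pvLoopB : List (List Int × (Int × Int)) → PySem.Dict (Int × Int) Int → PySem.Dict Int Int → List (List Int) × List (Int × Int)
  | [], _, _ => ([], [])
  | (jump, (hs, he)) :: rest, table, seen =>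
    let r := seen.getD he 0
    let seen' := seen.insert he (r + 1)
    match table.get? (he, r) with      -- table.get((he, r)); te is None ↔ none
    | none =>
      let rr := pvLoopB rest table seen'
      (jump :: rr.1, (hs, he) :: rr.2)
    | some te =>
      let rr := pvLoopB rest table seen'
      ((jump ++ [he]) :: rr.1, (hs, te) :: rr.2)

def join_phases_alt (jumps : List (List Int)) (head : List (Int × Int)) (tail : List (Int × Int)) : List (List Int) × (List (Int × Int)) :=
  let r := pvLoopB (jumps.zip head) (pvTable tail) PySem.Dict.empty
  (r.1 ++ jumps.drop head.length, r.2)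

-- ===== PRECONDITION & SPEC =====
def Spec_join_phases (jumps : List (List Int)) (head : List (Int × Int)) (tail : List (Int × Int)) (out : List (List Int) × (List (Int × Int))) : Prop := out = join_phases_alt jumps head tail
instance (jumps : List (List Int)) (head : List (Int × Int)) (tail : List (Int × Int)) (out : List (List Int) × (List (Int × Int))) : Decidable (Spec_join_phases jumps head tail out) := by unfold Spec_join_phases; infer_instance

-- ===== CLAIM (what is proved, stated in full; the proofs are below) =====
def Claim_equal_join_phases : Prop := ∀ (jumps : List (List Int)) (head : List (Int × Int)) (tail : List (Int × Int)), Dom_join_phases jumps head tail → Spec_join_phases jumps head tail (join_phases jumps head tail)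

-- ===== LEMMAS AND PROOFS =====

-- the ends (in tail order) of the tail segments starting at s
def pvEnds (s : Int) (ts : List (Int × Int)) : List Int :=
  (ts.filter (fun p => p.1 == s)).map (·.2)

lemma pvEnds_append (s : Int) (ts : List (Int × Int)) (p : Int × Int) :
    pvEnds s (ts ++ [p]) = pvEnds s ts ++ (if p.1 = s then [p.2] else []) := by
  unfold pvEnds
  by_cases h : p.1 = s <;> simp [List.filter_append, h]

-- phase-1 invariant: after folding 'done', rank holds each key's count and
-- table is the (key, rank) → end map of 'done'
lemma pvTable_invariant (tl : List (Int × Int)) :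
    ∀ (done : List (Int × Int)) (table : PySem.Dict (Int × Int) Int) (rank : PySem.Dict Int Int),
    (∀ s, rank.getD s 0 = ((pvEnds s done).length : Int)) →
    (∀ (s : Int) (j : Nat), table.get? (s, (j : Int)) = (pvEnds s done)[j]?) →
    (∀ (s : Int) (j : Nat), (tl.foldl (fun st p =>
        let r := st.2.getD p.1 0
        (st.1.insert (p.1, r) p.2, st.2.insert p.1 (r + 1))) (table, rank)).1.get? (s, (j : Int))
      = (pvEnds s (done ++ tl))[j]?) := by
  induction tl with
  | nil => intro done table rank _ ht s j; simpa using ht s j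
  | cons p rest ih =>
    intro done table rank hr ht s j
    have hstep : done ++ p :: rest = (done ++ [p]) ++ rest := by simp
    rw [List.foldl_cons, hstep]
    refine ih (done ++ [p]) _ _ ?_ ?_ s j
    · intro s'
      rw [PySem.Dict.getD_insert, pvEnds_append]
      by_cases h : s' = p.1
      · simp [h, hr p.1]
      · have h2 : ¬ p.1 = s' := fun hh => h hh.symm
        simp [h, h2, hr s']
    · intro s' j'
      rw [PySem.Dict.get?_insert, pvEnds_append, hr p.1]
      by_cases h : s' = p.1
      · subst h
        by_cases hj : (j' : Int) = ((pvEnds p.1 done).length : Int)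
        · have hje : j' = (pvEnds p.1 done).length := by exact_mod_cast hj
          simp [hje]
        · have hjne : j' ≠ (pvEnds p.1 done).length := by
            intro hh; exact hj (by exact_mod_cast hh)
          rw [if_neg (by simp [hj])]
          rw [ht p.1 j']
          rcases Nat.lt_or_ge j' (pvEnds p.1 done).length with hlt | hge
          · rw [List.getElem?_append_left hlt]
          · have h1 : (pvEnds p.1 done)[j']? = none := by
              simp; omega
            have h2 : (pvEnds p.1 done ++ [p.2])[j']? = none := by
              simp; omega
            simp [h1, h2]
      · have : ((s', (j' : Int)) : Int × Int) ≠ (p.1, ((pvEnds p.1 done).length : Int)) := by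
          simp [h]
        rw [if_neg this, ht s' j']
        have h2 : ¬ p.1 = s' := fun hh => h hh.symm
        simp [h2]

lemma pvTable_get (tail : List (Int × Int)) (s : Int) (j : Nat) :
    (pvTable tail).get? (s, (j : Int)) = (pvEnds s tail)[j]? := by
  have := pvTable_invariant tail [] PySem.Dict.empty PySem.Dict.empty
    (by intro s; simp [pvEnds, PySem.Dict.getD_empty])
    (by intro s j; simp [pvEnds, PySem.Dict.get?_empty])
    s j
  simpa [pvTable] using this

-- A's inner scan + remove, characterised through pvEnds
lemma pvStepA : ∀ (ts : List (Int × Int)) (he : Int) (tp : Int × Int),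
    ts.find? (fun p => p.1 == he) = some tp →
    tp.1 = he ∧
    ∃ ts', PySem.List.remove? ts tp = some ts' ∧
      pvEnds he ts = tp.2 :: pvEnds he ts' ∧
      ∀ s, s ≠ he → pvEnds s ts = pvEnds s ts' := by
  intro ts
  induction ts with
  | nil => intro he tp h; simp at h
  | cons p rest ih =>
    intro he tp h
    by_cases hp : p.1 = he
    · rw [List.find?_cons_of_pos (by simpa using hp)] at h
      cases h
      refine ⟨hp, rest, PySem.List.remove?_cons_self _ _, ?_, ?_⟩
      · simp [pvEnds, hp]
      · intro s hs
        simp [pvEnds, hp, Ne.symm hs]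
    · rw [List.find?_cons_of_neg (by simpa using hp)] at h
      obtain ⟨htp, ts', hrem, hhe, hoth⟩ := ih he tp h
      have hne : p ≠ tp := fun e => hp (e ▸ htp)
      refine ⟨htp, p :: ts', ?_, ?_, ?_⟩
      · rw [PySem.List.remove?_cons_of_ne _ hne, hrem]; rfl
      · simp [pvEnds, hp] at hhe ⊢
        simpa [pvEnds] using hhe
      · intro s hs
        have := hoth s hs
        by_cases hps : p.1 = s <;>
          simp [pvEnds, hps] at this ⊢ <;> simpa [pvEnds] using this

-- phase-2 invariant: seen[v] ranks consumed so far; A's remaining tail, seen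
-- through pvEnds, is the corresponding drop of the original pvEnds
lemma pvLoop_eq (tail0 : List (Int × Int)) :
    ∀ (l : List (List Int × (Int × Int))) (ts : List (Int × Int)) (seen : PySem.Dict Int Int),
    (∀ v, ∃ k : Nat, seen.getD v 0 = (k : Int) ∧ pvEnds v ts = (pvEnds v tail0).drop k) →
    pvLoopB l (pvTable tail0) seen = ((pvLoopA l ts).1, (pvLoopA l ts).2.2) := by
  intro l
  induction l with
  | nil => intro ts seen _; rfl
  | cons x rest ih =>
    obtain ⟨jump, hs, he⟩ := x
    intro ts seen hinv
    obtain ⟨k, hk, hdrop⟩ := hinv he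
    have hget : (pvTable tail0).get? (he, seen.getD he 0) = (pvEnds he ts).head? := by
      rw [hk, pvTable_get, ← List.head?_drop, ← hdrop]
    cases hfind : ts.find? (fun p => p.1 == he) with
    | none =>
      have hempty : pvEnds he ts = [] := by
        rw [List.find?_eq_none] at hfind
        simp only [pvEnds, List.map_eq_nil_iff, List.filter_eq_nil_iff]
        intro p hp; simpa using hfind p hp
      have hnone : (pvTable tail0).get? (he, seen.getD he 0) = none := by
        rw [hget, hempty]; rfl
      have hinv' : ∀ v, ∃ k' : Nat, (seen.insert he (seen.getD he 0 + 1)).getD v 0 = (k' : Int) ∧ pvEnds v ts = (pvEnds v tail0).drop k' := by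
        intro v
        rw [PySem.Dict.getD_insert]
        by_cases hv : v = he
        · subst hv
          refine ⟨k + 1, by rw [if_pos rfl, hk]; push_cast; ring, ?_⟩
          rw [hempty, ← List.tail_drop, ← hdrop, hempty]
          rfl
        · obtain ⟨k', h1, h2⟩ := hinv v
          exact ⟨k', by simp [hv, h1], h2⟩
      simp only [pvLoopA, pvLoopB, hfind, hnone]
      rw [ih ts _ hinv']
    | some tp =>
      obtain ⟨htp, ts', hrem, hhe, hoth⟩ := pvStepA ts he tp hfind
      have hsome : (pvTable tail0).get? (he, seen.getD he 0) = some tp.2 := by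
        rw [hget, hhe]; rfl
      have hinv' : ∀ v, ∃ k' : Nat, (seen.insert he (seen.getD he 0 + 1)).getD v 0 = (k' : Int) ∧ pvEnds v ts' = (pvEnds v tail0).drop k' := by
        intro v
        rw [PySem.Dict.getD_insert]
        by_cases hv : v = he
        · subst hv
          refine ⟨k + 1, by rw [if_pos rfl, hk]; push_cast; ring, ?_⟩
          have h3 : pvEnds v ts' = ((pvEnds v tail0).drop k).tail := by
            rw [← hdrop, hhe]; rfl
          rw [h3, List.tail_drop]
        · obtain ⟨k', h1, h2⟩ := hinv v
          exact ⟨k', by simp [hv, h1], (hoth v hv) ▸ h2⟩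
      simp only [pvLoopA, pvLoopB, hfind, hsome, hrem, Option.getD_some, htp]
      rw [ih ts' _ hinv']

-- ===== VERDICT (by name: the statement is the Claim_ definition above) =====
theorem join_phases_spec : Claim_equal_join_phases := by
  intro jumps head tail _
  unfold Spec_join_phases join_phases join_phases_alt
  rw [pvLoop_eq tail (jumps.zip head) tail PySem.Dict.empty ?_]
  intro v
  exact ⟨0, by simp [PySem.Dict.getD_empty], by simp⟩
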